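-- pv_equiv track=rewrite | github.com/MikitaTsiarentsyeu/Md-PT1-53-22 | Tasks/Krupienkova/Task4/task4_1.py | get_space_list
-- ===== SOURCE A (Python) =====
-- def get_space_count(space_index, extra_spaces, numb_of_spaces):
--     """Returns the number of spaces in one position."""
--     if space_index < extra_spaces % numb_of_spaces:
--         return extra_spaces // numb_of_spaces + 1
--     return extra_spaces // numb_of_spaces
--
-- def get_space_list(word_list, line_width):
--     """Returns a list of spaces."""
--     space_list = [1 for i in range(len(word_list) - 1)]
--
--     current_line_width = len(space_list) + sum(len(word) for word in word_list)
--     if line_width == current_line_width: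
--         return space_list
--
--     extra_spaces = line_width - current_line_width
--     for i in range(len(space_list)):
--         space_list[i] += get_space_count(i, extra_spaces, len(space_list))
--     return space_list
-- ===== SOURCE B (Python) =====
-- def get_space_list(word_list, line_width):
--     """Returns a list of spaces (ceil-redistribution over the gaps)."""
--     remaining = line_width - sum(len(w) for w in word_list)
--     result = []
--     for g in range(len(word_list) - 1, 0, -1):
--         q = -(-remaining // g)
--         result.append(q)
--         remaining -= q
--     return result
-- ===== Notes on version B (the rewrite author's own statement) =====
-- stated objective: alternative
-- what changed: Replaces the base-1 list, the early-return branch and the two-pass divmod add with a single running ceil-redistribution loop that maintains the remaining width and remaining gap count, building the result in one pass without a pre-built list.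
import Mathlib
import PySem

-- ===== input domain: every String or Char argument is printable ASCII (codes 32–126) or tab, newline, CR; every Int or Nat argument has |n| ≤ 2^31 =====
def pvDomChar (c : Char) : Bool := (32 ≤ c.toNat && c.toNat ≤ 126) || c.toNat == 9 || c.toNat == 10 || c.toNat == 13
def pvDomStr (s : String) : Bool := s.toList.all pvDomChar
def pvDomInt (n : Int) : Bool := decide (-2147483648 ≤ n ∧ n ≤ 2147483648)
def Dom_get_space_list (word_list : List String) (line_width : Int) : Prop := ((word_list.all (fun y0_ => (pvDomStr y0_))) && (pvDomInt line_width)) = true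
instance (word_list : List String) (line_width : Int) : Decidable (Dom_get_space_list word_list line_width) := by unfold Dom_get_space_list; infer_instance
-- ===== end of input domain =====

-- B replaces A's base-1 list, early return and divmod add with one running ceil-redistribution loop over the gaps (objective: alternative).

-- ===== PORT A =====
def get_space_count (space_index extra_spaces numb_of_spaces : Int) : Int :=
  if space_index < PySem.Int.mod extra_spaces numb_of_spaces then
    PySem.Int.floordiv extra_spaces numb_of_spaces + 1
  else
    PySem.Int.floordiv extra_spaces numb_of_spaces

def get_space_list (word_list : List String) (line_width : Int) : List Int :=
  let space_list : List Int := (List.range (word_list.length - 1)).map (fun _ => 1)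
  let current_line_width : Int :=
    (space_list.length : Int) + ((word_list.map (fun w => PySem.Str.len w)).sum)
  if line_width = current_line_width then space_list
  else
    let extra_spaces := line_width - current_line_width
    -- in-place 'space_list[i] += …' over all indices; every entry was 1
    (List.range space_list.length).map
      (fun (i : Nat) => 1 + get_space_count (i : Int) extra_spaces (space_list.length : Int))

-- ===== PORT B =====
-- the 'for g in range(gaps, 0, -1)' loop of Source B, carrying 'remaining'
def altGaps (remaining : Int) (g : Nat) : List Int :=
  match g with
  | 0 => []
  | Nat.succ k =>
    let q := -(PySem.Int.floordiv (-remaining) ((Nat.succ k : Nat) : Int))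
    q :: altGaps (remaining - q) k

def get_space_list_alt (word_list : List String) (line_width : Int) : List Int :=
  altGaps (line_width - ((word_list.map (fun w => PySem.Str.len w)).sum)) (word_list.length - 1)

-- ===== PRECONDITION & SPEC =====
def Spec_get_space_list (word_list : List String) (line_width : Int) (out : List Int) : Prop := out = get_space_list_alt word_list line_width
instance (word_list : List String) (line_width : Int) (out : List Int) : Decidable (Spec_get_space_list word_list line_width out) := by unfold Spec_get_space_list; infer_instance

-- ===== CLAIM (what is proved, stated in full; the proofs are below) =====
def Claim_equal_get_space_list : Prop := ∀ (word_list : List String) (line_width : Int), Dom_get_space_list word_list line_width → Spec_get_space_list word_list line_width (get_space_list word_list line_width)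

-- ===== LEMMAS AND PROOFS =====

-- characterisation of Python floor division/modulo by a positive divisor
theorem fm_char (a d r b : Int) (hb : 0 < b) (h : a = d * b + r) (h0 : 0 ≤ r) (h1 : r < b) :
    PySem.Int.floordiv a b = d ∧ PySem.Int.mod a b = r := by
  have hd : PySem.Int.floordiv a b = d := by
    rw [PySem.Int.floordiv_eq_iff_of_pos hb]
    constructor <;> nlinarith
  have hm := PySem.Int.floordiv_mul_add_mod a b
  rw [hd] at hm
  exact ⟨hd, by omega⟩

-- ceiling division -((-a)//b) = a//b + (1 if a % b > 0 else 0)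
theorem ceil_char (a b : Int) (hb : 0 < b) :
    -(PySem.Int.floordiv (-a) b)
      = PySem.Int.floordiv a b + (if 0 < PySem.Int.mod a b then 1 else 0) := by
  have hm0 := PySem.Int.mod_nonneg a hb
  have hm1 := PySem.Int.mod_lt a hb
  have hdm := PySem.Int.floordiv_mul_add_mod a b
  rw [PySem.Int.neg_floordiv_neg_eq_iff_of_pos hb]
  split_ifs with hr <;> constructor <;> nlinarith

theorem get_space_count_eq (i x g : Int) :
    get_space_count i x g
      = PySem.Int.floordiv x g + (if i < PySem.Int.mod x g then 1 else 0) := by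
  unfold get_space_count
  split_ifs <;> ring

-- altGaps implements the floor/remainder distribution in closed form
theorem altGaps_eq (g : Nat) : ∀ t : Int,
    altGaps t g = (List.range g).map
      (fun (i : Nat) => PySem.Int.floordiv t g + if (i : Int) < PySem.Int.mod t g then 1 else 0) := by
  induction g with
  | zero => intro t; simp [altGaps]
  | succ k ih =>
    intro t
    have hb : (0 : Int) < ((k : Int) + 1) := by positivity
    have hm0 := PySem.Int.mod_nonneg t hb
    have hm1 := PySem.Int.mod_lt t hb
    have hdm := PySem.Int.floordiv_mul_add_mod t ((k : Int) + 1)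
    set d := PySem.Int.floordiv t ((k : Int) + 1) with hd
    set r := PySem.Int.mod t ((k : Int) + 1) with hr
    have hq : -(PySem.Int.floordiv (-t) ((k : Int) + 1)) = d + (if 0 < r then 1 else 0) :=
      ceil_char t _ hb
    simp only [altGaps, List.range_succ_eq_map, List.map_cons, List.map_map]
    have hcast : ((Nat.succ k : Nat) : Int) = (k : Int) + 1 := by push_cast; ring
    rw [hcast, hq]
    rw [List.cons.injEq]
    refine ⟨?_, ?_⟩
    · simp only [Nat.cast_zero, ← hd, ← hr]
    · set q : Int := d + (if 0 < r then 1 else 0) with hqd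
      rw [ih (t - q)]
      rcases Nat.eq_zero_or_pos k with hk | hk
      · subst hk; simp
      · have hkb : (0 : Int) < (k : Int) := by exact_mod_cast hk
        have hchar : PySem.Int.floordiv (t - q) (k : Int) = d ∧
            PySem.Int.mod (t - q) (k : Int) = r - (if 0 < r then 1 else 0) := by
          apply fm_char _ _ _ _ hkb
          · rw [hqd]; split_ifs <;> nlinarith
          · split_ifs <;> omega
          · split_ifs <;> omega
        rw [hchar.1, hchar.2]
        apply List.map_congr_left
        intro i _
        simp only [Function.comp]
        have : ((Nat.succ i : Nat) : Int) = (i : Int) + 1 := by push_cast; ring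
        rw [this]
        split_ifs <;> omega

-- both branches of A equal the closed-form distribution, for any gap count g and word-length sum S
theorem main_eq (g : Nat) (S lw : Int) :
    (if lw = ((((List.range g).map (fun _ => (1 : Int))).length : Int) + S)
       then (List.range g).map (fun _ => (1 : Int))
       else (List.range (((List.range g).map (fun _ => (1 : Int))).length)).map
         (fun (i : Nat) => 1 + get_space_count (i : Int)
            (lw - ((((List.range g).map (fun _ => (1 : Int))).length : Int) + S))
            ((((List.range g).map (fun _ => (1 : Int))).length : Int))))
    = altGaps (lw - S) g := by
  simp only [List.length_map, List.length_range]
  rw [altGaps_eq]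
  rcases Nat.eq_zero_or_pos g with hg | hg
  · subst hg; simp
  · have hgb : (0 : Int) < (g : Int) := by exact_mod_cast hg
    set t : Int := lw - S with ht
    have hm0 := PySem.Int.mod_nonneg t hgb
    have hm1 := PySem.Int.mod_lt t hgb
    have hdm := PySem.Int.floordiv_mul_add_mod t (g : Int)
    set d := PySem.Int.floordiv t (g : Int) with hd
    set r := PySem.Int.mod t (g : Int) with hr
    have hx : lw - ((g : Int) + S) = t - (g : Int) := by omega
    have hchar : PySem.Int.floordiv (t - (g : Int)) (g : Int) = d - 1 ∧
        PySem.Int.mod (t - (g : Int)) (g : Int) = r := by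
      apply fm_char _ _ _ _ hgb
      · nlinarith
      · omega
      · omega
    split_ifs with hlw
    · -- lw equals current width: t = g, so d = 1, r = 0 and every gap is 1
      have htg : t = (g : Int) := by omega
      have h10 : d = 1 ∧ r = 0 := by
        have := fm_char t 1 0 (g : Int) hgb (by omega) le_rfl hgb
        exact ⟨by rw [hd, this.1], by rw [hr, this.2]⟩
      apply List.map_congr_left
      intro i _
      rw [h10.1, h10.2]
      split_ifs <;> omega
    · rw [hx]
      apply List.map_congr_left
      intro i _
      rw [get_space_count_eq, hchar.1, hchar.2]
      ring

-- ===== VERDICT (by name: the statement is the Claim_ definition above) =====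
theorem get_space_list_spec : Claim_equal_get_space_list := by
  intro word_list line_width _
  unfold Spec_get_space_list get_space_list get_space_list_alt
  dsimp only []
  exact main_eq (word_list.length - 1) ((word_list.map (fun w => PySem.Str.len w)).sum) line_width
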